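-- pv_equiv track=rewrite | github.com/joshuarocksolid/ChoreBoyCodeStudio | app/intelligence/hover_service.py | _extract_symbol_under_cursor
-- ===== SOURCE A (Python) =====
-- def _extract_symbol_under_cursor(source_text: str, cursor_position: int) -> str:
--     safe_cursor = max(0, min(cursor_position, len(source_text)))
--     if safe_cursor == 0:
--         return ""
--
--     left = safe_cursor
--     while left > 0 and _is_symbol_character(source_text[left - 1]):
--         left -= 1
--
--     right = safe_cursor
--     while right < len(source_text) and _is_symbol_character(source_text[right]):
--         right += 1
--
--     symbol = source_text[left:right].strip()
--     if not symbol.isidentifier():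
--         return ""
--     return symbol
--
-- def _is_symbol_character(character: str) -> bool:
--     return character.isalnum() or character == "_"
-- ===== SOURCE B (Python) =====
-- def _is_symbol_character(character: str) -> bool:
--     return character.isalnum() or character == "_"
--
--
-- def _extract_symbol_under_cursor(source_text: str, cursor_position: int) -> str:
--     safe_cursor = max(0, min(cursor_position, len(source_text)))
--     if safe_cursor == 0:
--         return ""
--
--     # One forward pass: collect all maximal runs of symbol characters as (start, end) spans.
--     spans = []
--     run_start = None
--     for i, ch in enumerate(source_text):
--         if _is_symbol_character(ch):
--             if run_start is None:
--                 run_start = i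
--         else:
--             if run_start is not None:
--                 spans.append((run_start, i))
--                 run_start = None
--     if run_start is not None:
--         spans.append((run_start, len(source_text)))
--
--     # Select the (unique) span touching the cursor.
--     for start, end in spans:
--         if start <= safe_cursor <= end:
--             symbol = source_text[start:end].strip()
--             if symbol.isidentifier():
--                 return symbol
--             return ""
--     return ""
-- ===== Notes on version B (the rewrite author's own statement) =====
-- stated objective: alternative
-- what changed: Replaces A's two while-loops that expand left/right from the cursor with a single forward scan that tokenizes the whole text into maximal symbol-character runs as (start, end) spans and then selects the unique span touching the cursor.
import Mathlib
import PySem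

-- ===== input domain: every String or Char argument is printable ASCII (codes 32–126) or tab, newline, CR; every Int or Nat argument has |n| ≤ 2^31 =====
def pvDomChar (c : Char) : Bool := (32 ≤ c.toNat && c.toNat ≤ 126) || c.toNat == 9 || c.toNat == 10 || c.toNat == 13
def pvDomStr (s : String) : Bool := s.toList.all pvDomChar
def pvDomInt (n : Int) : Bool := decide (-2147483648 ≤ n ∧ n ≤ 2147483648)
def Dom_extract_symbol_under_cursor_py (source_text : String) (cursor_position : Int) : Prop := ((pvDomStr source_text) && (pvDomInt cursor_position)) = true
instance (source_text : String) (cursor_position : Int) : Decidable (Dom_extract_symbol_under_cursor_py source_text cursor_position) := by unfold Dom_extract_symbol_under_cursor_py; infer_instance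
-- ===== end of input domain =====

-- B replaces A's outward two-pointer expansion by a single forward pass that tokenizes the whole
-- text into maximal symbol-run spans and then selects the span touching the cursor (alternative
-- decomposition, same cost).


-- shared helper: Python's _is_symbol_character (both Pythons call it); exact on the ASCII domain
def isSymChar (c : Char) : Bool := PySem.Chars.isalnum c || c == '_'

-- hand port of str.isidentifier(): exact on the ASCII domain (first char letter or '_', rest alnum or '_')
def pyIsIdentifier (cs : List Char) : Bool :=
  match cs with
  | [] => false
  | c :: rest => (PySem.Chars.isalpha c || c == '_') && rest.all (fun d => PySem.Chars.isalnum d || d == '_')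

-- ===== PORT A =====
-- A's left while-loop: decrement while the char to the left is a symbol char
def leftA (cs : List Char) : Nat → Nat
  | 0 => 0
  | l + 1 => if isSymChar (cs.getD l ' ') then leftA cs l else l + 1

-- A's right while-loop: increment while in range and the char is a symbol char
def rightA (cs : List Char) (r : Nat) : Nat :=
  if h : r < cs.length ∧ isSymChar (cs.getD r ' ') then rightA cs (r + 1) else r
termination_by cs.length - r
decreasing_by omega

def extract_symbol_under_cursor_py (source_text : String) (cursor_position : Int) : String :=
  let cs := source_text.toList
  let safe : Int := max 0 (min cursor_position (cs.length : Int))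
  if safe = 0 then "" else
    let c := safe.toNat
    let left := leftA cs c
    let right := rightA cs c
    let symbol := PySem.Chars.strip (PySem.List.slice cs (some (left : Int)) (some (right : Int)))
    if pyIsIdentifier symbol then String.ofList symbol else ""

-- ===== PORT B =====
-- B's single forward pass: collect maximal symbol-run spans as (start, end) pairs
def spansAux (cs : List Char) (i : Nat) (cur : Option Nat) : List (Nat × Nat) :=
  match cs, cur with
  | [], none => []
  | [], some s => [(s, i)]
  | ch :: rest, cur =>
    if isSymChar ch then spansAux rest (i + 1) (some (cur.getD i))
    else
      match cur with
      | some s => (s, i) :: spansAux rest (i + 1) none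
      | none => spansAux rest (i + 1) none

def extract_symbol_under_cursor_py_alt (source_text : String) (cursor_position : Int) : String :=
  let cs := source_text.toList
  let safe : Int := max 0 (min cursor_position (cs.length : Int))
  if safe = 0 then "" else
    let c := safe.toNat
    match (spansAux cs 0 none).find? (fun p => decide (p.1 ≤ c) && decide (c ≤ p.2)) with
    | some (s, e) =>
      let symbol := PySem.Chars.strip (PySem.List.slice cs (some (s : Int)) (some (e : Int)))
      if pyIsIdentifier symbol then String.ofList symbol else ""
    | none => ""

-- ===== PRECONDITION & SPEC =====
def Spec_extract_symbol_under_cursor_py (source_text : String) (cursor_position : Int) (out : String) : Prop := out = extract_symbol_under_cursor_py_alt source_text cursor_position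
instance (source_text : String) (cursor_position : Int) (out : String) : Decidable (Spec_extract_symbol_under_cursor_py source_text cursor_position out) := by unfold Spec_extract_symbol_under_cursor_py; infer_instance

-- ===== CLAIM (what is proved, stated in full; the proofs are below) =====
def Claim_equal_extract_symbol_under_cursor_py : Prop := ∀ (source_text : String) (cursor_position : Int), Dom_extract_symbol_under_cursor_py source_text cursor_position → Spec_extract_symbol_under_cursor_py source_text cursor_position (extract_symbol_under_cursor_py source_text cursor_position)

-- ===== LEMMAS AND PROOFS =====

-- the "symbol char at global index j" test both programs are about (false past the end)
def symAt (cs : List Char) (j : Nat) : Bool := isSymChar (cs.getD j ' ')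

theorem symAt_lt (cs : List Char) (j : Nat) (h : symAt cs j = true) : j < cs.length := by
  by_contra hn
  have hd : cs.getD j ' ' = ' ' := List.getD_eq_default _ _ (by omega)
  simp only [symAt] at h
  rw [hd] at h
  exact absurd h (by decide)

-- a maximal run of symbol chars
def Run (cs : List Char) (s e : Nat) : Prop :=
  s < e ∧ (∀ j, s ≤ j → j < e → symAt cs j = true) ∧ (s = 0 ∨ symAt cs (s - 1) = false) ∧ symAt cs e = false

theorem leftA_eq (cs : List Char) (l s : Nat) (hle : s ≤ l)
    (hall : ∀ j, s ≤ j → j < l → symAt cs j = true)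
    (hb : s = 0 ∨ symAt cs (s - 1) = false) : leftA cs l = s := by
  induction l with
  | zero =>
    have : s = 0 := by omega
    subst this; rfl
  | succ l ih =>
    by_cases hs : s = l + 1
    · subst hs
      have hsl : symAt cs l = false := by
        rcases hb with h | h
        · omega
        · simpa using h
      simp only [symAt] at hsl
      simp only [leftA, hsl, Bool.false_eq_true, if_false]
    · have hsym : symAt cs l = true := hall l (by omega) (by omega)
      simp only [symAt] at hsym
      simp only [leftA, hsym, if_true]
      exact ih (by omega) (fun j h1 h2 => hall j h1 (by omega))

theorem rightA_eq (cs : List Char) (r e : Nat) (hle : r ≤ e)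
    (hall : ∀ j, r ≤ j → j < e → symAt cs j = true)
    (hb : symAt cs e = false) : rightA cs r = e := by
  by_cases hre : r = e
  · subst hre
    rw [rightA]
    split
    · next h =>
      simp only [symAt] at hb
      exact absurd h.2 (by rw [hb]; simp)
    · rfl
  · have hsym : symAt cs r = true := hall r (by omega) (by omega)
    have hlt : r < cs.length := symAt_lt cs r hsym
    simp only [symAt] at hsym
    rw [rightA, dif_pos ⟨hlt, hsym⟩]
    exact rightA_eq cs (r + 1) e (by omega) (fun j h1 h2 => hall j (by omega) h2) hb
termination_by e - r
decreasing_by omega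

-- lower bound carried by the scanner state
def lb (i : Nat) (cur : Option Nat) : Nat := match cur with | none => i | some s => s

-- state invariant of B's forward pass
def ScanInv (cs : List Char) (i : Nat) (cur : Option Nat) : Prop :=
  match cur with
  | none => i = 0 ∨ symAt cs (i - 1) = false
  | some s => s < i ∧ (∀ j, s ≤ j → j < i → symAt cs j = true) ∧ (s = 0 ∨ symAt cs (s - 1) = false)

-- full characterisation of spansAux: every produced span is a maximal run at or after the state's
-- lower bound, spans are separated in order, and every symbol position at or after the lower bound
-- is covered by some produced span
theorem spansAux_spec (g : List Char) (cs : List Char) (i : Nat) (cur : Option Nat)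
    (hcs : cs = g.drop i) (hinv : ScanInv g i cur) :
    (∀ p ∈ spansAux cs i cur, Run g p.1 p.2 ∧ lb i cur ≤ p.1) ∧
    List.Pairwise (fun p q : Nat × Nat => p.2 < q.1) (spansAux cs i cur) ∧
    (∀ j, symAt g j = true → lb i cur ≤ j → ∃ p ∈ spansAux cs i cur, p.1 ≤ j ∧ j < p.2) := by
  induction cs generalizing i cur with
  | nil =>
    have hlen : g.length ≤ i := by
      have := congrArg List.length hcs
      simp [List.length_drop] at this
      omega
    have hsymge : ∀ j, i ≤ j → symAt g j = false := by
      intro j hj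
      by_contra h
      have := symAt_lt g j (by revert h; cases symAt g j <;> simp)
      omega
    match cur with
    | none =>
      refine ⟨by simp [spansAux], by simp [spansAux], ?_⟩
      intro j hj hlb
      have := hsymge j hlb
      simp only [lb] at hlb
      rw [this] at hj
      exact absurd hj (by simp)
    | some s =>
      obtain ⟨hsi, hall, hb⟩ := hinv
      have hrun : Run g s i := ⟨hsi, hall, hb, hsymge i (by omega)⟩
      refine ⟨?_, by simp [spansAux], ?_⟩
      · intro p hp
        simp [spansAux] at hp
        subst hp
        exact ⟨hrun, by simp [lb]⟩
      · intro j hj hlb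
        have hjlt := symAt_lt g j hj
        simp only [lb] at hlb
        refine ⟨(s, i), by simp [spansAux], hlb, ?_⟩
        by_contra h
        have := hsymge j (by omega)
        rw [this] at hj
        exact absurd hj (by simp)
  | cons ch rest ih =>
    have hget : g[i]? = some ch := by rw [← List.head?_drop, ← hcs]; rfl
    have hilt : i < g.length := by
      rcases List.getElem?_eq_some_iff.mp hget with ⟨h, _⟩; exact h
    have hchD : g.getD i ' ' = ch := by
      rcases List.getElem?_eq_some_iff.mp hget with ⟨h, he⟩
      simp [List.getD, hget]
    have hrest : rest = g.drop (i + 1) := by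
      calc rest = List.drop 1 (ch :: rest) := rfl
        _ = List.drop 1 (List.drop i g) := by rw [hcs]
        _ = g.drop (i + 1) := by rw [List.drop_drop]
    have hsymi : symAt g i = isSymChar ch := by
      simp only [symAt]
      rw [hchD]
    by_cases hch : isSymChar ch = true
    · -- extend / open a run
      have hinv' : ScanInv g (i + 1) (some (cur.getD i)) := by
        match cur with
        | none =>
          refine ⟨by simp, ?_, ?_⟩
          · intro j h1 h2
            simp at h1 h2
            have : j = i := by omega
            subst this; rw [hsymi]; exact hch
          · simpa [lb] using hinv
        | some s =>
          obtain ⟨h1, h2, h3⟩ := hinv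
          refine ⟨by simp; omega, ?_, by simpa using h3⟩
          intro j hj1 hj2
          simp at hj1 hj2
          rcases Nat.lt_or_ge j i with h | h
          · exact h2 j hj1 h
          · have : j = i := by omega
            subst this; rw [hsymi]; exact hch
      have hres := ih (i + 1) (some (cur.getD i)) hrest hinv'
      have hlbeq : lb (i + 1) (some (cur.getD i)) = lb i cur := by
        match cur with
        | none => simp [lb]
        | some s => simp [lb]
      simp only [spansAux, hch, if_true]
      exact ⟨fun p hp => ⟨(hres.1 p hp).1, hlbeq ▸ (hres.1 p hp).2⟩, hres.2.1,
        fun j hj hlb => hres.2.2 j hj (hlbeq ▸ hlb)⟩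
    · -- close a run (or keep scanning)
      have hchf : isSymChar ch = false := by revert hch; cases isSymChar ch <;> simp
      have hsymif : symAt g i = false := by rw [hsymi]; exact hchf
      match cur with
      | none =>
        have hres := ih (i + 1) none hrest (Or.inr (by simpa using hsymif))
        simp only [spansAux, hchf]
        refine ⟨fun p hp => ⟨(hres.1 p hp).1, ?_⟩, hres.2.1, ?_⟩
        · have := (hres.1 p hp).2; simp [lb] at this ⊢; omega
        · intro j hj hlb
          simp only [lb] at hlb
          have hne : j ≠ i := by intro h; subst h; rw [hsymif] at hj; exact absurd hj (by simp)
          exact hres.2.2 j hj (by simp [lb]; omega)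
      | some s =>
        obtain ⟨h1, h2, h3⟩ := hinv
        have hrun : Run g s i := ⟨h1, h2, h3, hsymif⟩
        have hres := ih (i + 1) none hrest (Or.inr (by simpa using hsymif))
        simp only [spansAux, hchf]
        refine ⟨?_, ?_, ?_⟩
        · intro p hp
          simp at hp
          rcases hp with hp | hp
          · subst hp; exact ⟨hrun, by simp [lb]⟩
          · refine ⟨(hres.1 p hp).1, ?_⟩
            have := (hres.1 p hp).2
            simp [lb] at this ⊢
            omega
        · refine List.Pairwise.cons ?_ hres.2.1
          intro q hq
          have := (hres.1 q hq).2
          simp [lb] at this ⊢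
          omega
        · intro j hj hlb
          simp only [lb] at hlb
          rcases Nat.lt_or_ge j i with h | h
          · exact ⟨(s, i), by simp, hlb, h⟩
          · have hne : j ≠ i := by intro he; subst he; rw [hsymif] at hj; exact absurd hj (by simp)
            obtain ⟨p, hp, hps⟩ := hres.2.2 j hj (by simp [lb]; omega)
            exact ⟨p, by simp [hp], hps⟩

-- uniqueness: at most one span of a separated list touches the cursor
theorem span_unique {L : List (Nat × Nat)} (hp : List.Pairwise (fun p q : Nat × Nat => p.2 < q.1) L)
    {p q : Nat × Nat} (hpL : p ∈ L) (hqL : q ∈ L) (c : Nat)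
    (hpc : p.1 ≤ c ∧ c ≤ p.2) (hqc : q.1 ≤ c ∧ c ≤ q.2) : p = q := by
  have hp' : List.Pairwise (fun p q : Nat × Nat => p = q ∨ p.2 < q.1 ∨ q.2 < p.1) L :=
    hp.imp (fun h => Or.inr (Or.inl h))
  have hsymm : Symmetric (fun p q : Nat × Nat => p = q ∨ p.2 < q.1 ∨ q.2 < p.1) := by
    intro a b h
    rcases h with h | h | h
    · exact Or.inl h.symm
    · exact Or.inr (Or.inr h)
    · exact Or.inr (Or.inl h)
  by_cases he : p = q
  · exact he
  · have := List.Pairwise.forall hsymm hp' hpL hqL he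
    rcases this with h | h | h
    · exact h
    · omega
    · omega

-- the selected span is exactly A's expansion result
theorem find_spans_eq (cs : List Char) (c : Nat) (h1 : 1 ≤ c) :
    (spansAux cs 0 none).find? (fun p => decide (p.1 ≤ c) && decide (c ≤ p.2)) =
      if symAt cs (c - 1) || symAt cs c then some (leftA cs c, rightA cs c) else none := by
  obtain ⟨hruns, hpw, hcov⟩ := spansAux_spec cs cs 0 none rfl (Or.inl rfl)
  by_cases hcond : (symAt cs (c - 1) || symAt cs c) = true
  · rw [if_pos hcond]
    -- a symbol position touching c
    have hj0 : ∃ j0, symAt cs j0 = true ∧ (j0 = c - 1 ∨ j0 = c) := by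
      rcases Bool.or_eq_true_iff.mp hcond with h | h
      · exact ⟨c - 1, h, Or.inl rfl⟩
      · exact ⟨c, h, Or.inr rfl⟩
    obtain ⟨j0, hj0sym, hj0eq⟩ := hj0
    obtain ⟨p, hpL, hp1, hp2⟩ := hcov j0 hj0sym (by simp [lb])
    have hrun := (hruns p hpL).1
    have hpc : p.1 ≤ c ∧ c ≤ p.2 := by rcases hj0eq with h | h <;> subst h <;> omega
    have hsome : ((spansAux cs 0 none).find?
        (fun p => decide (p.1 ≤ c) && decide (c ≤ p.2))).isSome := by
      rw [List.find?_isSome]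
      exact ⟨p, hpL, by simp [hpc.1, hpc.2]⟩
    obtain ⟨q, hq⟩ := Option.isSome_iff_exists.mp hsome
    have hqL := List.mem_of_find?_eq_some hq
    have hqpred := List.find?_some hq
    have hqc : q.1 ≤ c ∧ c ≤ q.2 := by
      simp at hqpred; exact hqpred
    have hpq : p = q := span_unique hpw hpL hqL c hpc hqc
    subst hpq
    rw [hq]
    obtain ⟨hlt, hall, hb, hend⟩ := hrun
    have hl : leftA cs c = p.1 :=
      leftA_eq cs c p.1 hpc.1 (fun j ha hb' => hall j ha (by omega)) hb
    have hr : rightA cs c = p.2 :=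
      rightA_eq cs c p.2 hpc.2 (fun j ha hb' => hall j (by omega) hb') hend
    rw [hl, hr]
  · rw [if_neg hcond]
    have hcf : symAt cs (c - 1) = false ∧ symAt cs c = false := by
      revert hcond; cases h1 : symAt cs (c - 1) <;> cases h2 : symAt cs c <;> simp
    rw [List.find?_eq_none]
    intro p hpL hpred
    have hrun := (hruns p hpL).1
    obtain ⟨hlt, hall, hb, hend⟩ := hrun
    simp at hpred
    rcases Nat.lt_or_ge c p.2 with h | h
    · have := hall c hpred.1 h
      rw [hcf.2] at this
      exact absurd this (by simp)
    · have hce : c = p.2 := by omega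
      have := hall (c - 1) (by omega) (by omega)
      rw [hcf.1] at this
      exact absurd this (by simp)

-- the no-span case: A's expansion collapses to the empty slice, which is not an identifier
theorem leftA_self (cs : List Char) (c : Nat) (h : symAt cs (c - 1) = false) :
    leftA cs c = c :=
  leftA_eq cs c c (le_refl c) (fun j ha hb => by omega) (Or.inr h)

theorem rightA_self (cs : List Char) (c : Nat) (h : symAt cs c = false) : rightA cs c = c :=
  rightA_eq cs c c (le_refl c) (fun j ha hb => by omega) h

-- ===== VERDICT (by name: the statement is the Claim_ definition above) =====
theorem extract_symbol_under_cursor_py_spec : Claim_equal_extract_symbol_under_cursor_py := by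
  intro source_text cursor_position _
  show extract_symbol_under_cursor_py source_text cursor_position =
    extract_symbol_under_cursor_py_alt source_text cursor_position
  unfold extract_symbol_under_cursor_py extract_symbol_under_cursor_py_alt
  dsimp only
  set cs := source_text.toList with hcs
  set safe : Int := max 0 (min cursor_position (cs.length : Int)) with hsafe
  by_cases h0 : safe = 0
  · rw [if_pos h0, if_pos h0]
  · rw [if_neg h0, if_neg h0]
    have hge : 0 ≤ safe := le_max_left _ _
    have hle : safe ≤ (cs.length : Int) := by
      rw [hsafe]
      exact max_le (by exact_mod_cast Nat.zero_le _) (min_le_right _ _)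
    set c := safe.toNat with hc
    have h1 : 1 ≤ c := by omega
    rw [find_spans_eq cs c h1]
    by_cases hcond : (symAt cs (c - 1) || symAt cs c) = true
    · rw [if_pos hcond]
    · rw [if_neg hcond]
      have hcf : symAt cs (c - 1) = false ∧ symAt cs c = false := by
        revert hcond; cases hx : symAt cs (c - 1) <;> cases hy : symAt cs c <;> simp
      rw [leftA_self cs c hcf.1, rightA_self cs c hcf.2]
      have hslice : PySem.List.slice cs (some (c : Int)) (some (c : Int)) = ([] : List Char) := by
        rw [PySem.List.slice_natCast]
        simp
      rw [hslice]
      simp [PySem.Chars.strip, PySem.Chars.lstrip, PySem.Chars.rstrip, pyIsIdentifier]
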